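-- pv_equiv track=rewrite | github.com/geoklinglaw/Trippin-Out | server/routes/tspAPI.py | split_into_days
-- ===== SOURCE A (Python) =====
-- def split_into_days(itinerary, num_days):
--     total_activities = len(itinerary)
--     min_activities_per_day = total_activities // num_days
--     extra_activities = total_activities % num_days
--
--     itinerary_days = []
--     backup_queue = []
--     visited = set()
--     index = 0
--
--     for _ in range(num_days):
--         day = []
--         activities_for_this_day = min_activities_per_day
--         if extra_activities > 0:
--             activities_for_this_day += 1
--             extra_activities -= 1
--
--         while len(day) < activities_for_this_day and index < total_activities:
--             activity = itinerary[index]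
--             index += 1
--             if activity not in visited:
--                 day.append(activity)
--                 visited.add(activity)
--             else:
--                 backup_queue.append(activity)
--
--         itinerary_days.append([0] + day)
--
--     return itinerary_days, itinerary_days
-- ===== SOURCE B (Python) =====
-- def split_into_days(itinerary, num_days):
--     uniq = list(dict.fromkeys(itinerary))
--     total = len(itinerary)
--     base = total // num_days
--     extra = total % num_days
--
--     days = []
--     pos = 0
--     for d in range(num_days):
--         quota = base + (1 if d < extra else 0)
--         days.append([0] + uniq[pos:pos + quota])
--         pos += quota
--     return days, days
-- ===== Notes on version B (the rewrite author's own statement) =====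
-- stated objective: simpler
-- what changed: B deduplicates the itinerary once up front with dict.fromkeys and then assigns each day its quota by slicing the dedup list at a running offset, replacing A's interleaved index/visited/backup scanning inside a nested while loop.
-- outside the precondition, e.g. on split_into_days([1, 2], 0): A raises ZeroDivisionError, B raises ZeroDivisionError
import Mathlib
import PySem

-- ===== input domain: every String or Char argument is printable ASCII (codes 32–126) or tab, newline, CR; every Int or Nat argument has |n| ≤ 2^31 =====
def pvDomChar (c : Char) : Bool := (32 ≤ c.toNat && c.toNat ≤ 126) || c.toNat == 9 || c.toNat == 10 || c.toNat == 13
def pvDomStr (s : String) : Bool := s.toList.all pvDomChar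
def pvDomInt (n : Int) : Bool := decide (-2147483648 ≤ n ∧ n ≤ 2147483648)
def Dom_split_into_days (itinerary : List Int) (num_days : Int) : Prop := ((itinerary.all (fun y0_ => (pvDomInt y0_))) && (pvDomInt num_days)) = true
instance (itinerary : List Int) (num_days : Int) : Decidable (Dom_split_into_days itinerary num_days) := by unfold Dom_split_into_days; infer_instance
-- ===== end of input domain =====

-- B deduplicates the itinerary once up front (dict.fromkeys) and slices each day's quota off
-- the dedup list at a running offset, instead of A's interleaved index/visited/backup scan.
-- Python A returns the SAME list object twice; the equivalence here is about the returned value.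

-- ===== PORT A =====
-- A's inner while loop: while len(day) < quota and index < total: …
def pvInnerA (it : List Int) (quota : Int) (day : List Int)
    (visited : PySem.Set Int) (backup : List Int) (index : Nat) :
    List Int × PySem.Set Int × List Int × Nat :=
  if h : (day.length : Int) < quota ∧ index < it.length then
    let activity := it.getD index 0   -- itinerary[index]; 0 ≤ index < len(itinerary), exact
    if PySem.Set.contains visited activity then
      pvInnerA it quota day visited (backup ++ [activity]) (index + 1)
    else
      pvInnerA it quota (day ++ [activity]) (PySem.Set.add visited activity) backup (index + 1)
  else (day, visited, backup, index)
termination_by it.length - index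
decreasing_by all_goals omega

-- A's outer loop body (state: itinerary_days, visited, backup_queue, index, extra_activities)
def pvStepA (it : List Int) (m : Int)
    (st : List (List Int) × PySem.Set Int × List Int × Nat × Int) (_ : Int) :
    List (List Int) × PySem.Set Int × List Int × Nat × Int :=
  match st with
  | (days, visited, backup, index, extra) =>
    let afd := if extra > 0 then m + 1 else m
    let extra' := if extra > 0 then extra - 1 else extra
    match pvInnerA it afd [] visited backup index with
    | (day, visited', backup', index') => (days ++ [0 :: day], visited', backup', index', extra')

def split_into_days (itinerary : List Int) (num_days : Int) : List (List Int) × List (List Int) :=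
  let total : Int := itinerary.length
  let m := PySem.Int.floordiv total num_days      -- ZeroDivisionError for num_days = 0: excluded by Pre_
  let e := PySem.Int.mod total num_days
  let fin := (PySem.List.pyRange 0 num_days 1).foldl (pvStepA itinerary m)
      ([], PySem.Set.empty, [], 0, e)
  (fin.1, fin.1)

-- ===== PORT B =====
-- B's loop body (state: days, pos)
def pvStepB (uniq : List Int) (base e : Int) (st : List (List Int) × Int) (d : Int) :
    List (List Int) × Int :=
  let quota := base + (if d < e then 1 else 0)
  (st.1 ++ [0 :: PySem.List.slice uniq (some st.2) (some (st.2 + quota))], st.2 + quota)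

def split_into_days_alt (itinerary : List Int) (num_days : Int) : List (List Int) × List (List Int) :=
  let uniq := PySem.List.dedup itinerary          -- list(dict.fromkeys(itinerary))
  let total : Int := itinerary.length
  let base := PySem.Int.floordiv total num_days   -- ZeroDivisionError for num_days = 0: excluded by Pre_
  let extra := PySem.Int.mod total num_days
  let fin := (PySem.List.pyRange 0 num_days 1).foldl (pvStepB uniq base extra) ([], 0)
  (fin.1, fin.1)

-- ===== PRECONDITION & SPEC =====
-- Pre_ excludes only num_days = 0, on which Python A raises ZeroDivisionError.
def Pre_split_into_days (_itinerary : List Int) (num_days : Int) : Prop := num_days ≠ 0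
instance (itinerary : List Int) (num_days : Int) : Decidable (Pre_split_into_days itinerary num_days) := by unfold Pre_split_into_days; infer_instance

def pvWitness_split_into_days : List Int × Int := ([1, 2, 1, 3], 2)

def Spec_split_into_days (itinerary : List Int) (num_days : Int) (out : List (List Int) × List (List Int)) : Prop := out = split_into_days_alt itinerary num_days
instance (itinerary : List Int) (num_days : Int) (out : List (List Int) × List (List Int)) : Decidable (Spec_split_into_days itinerary num_days out) := by unfold Spec_split_into_days; infer_instance

-- ===== CLAIM (what is proved, stated in full; the proofs are below) =====
def Claim_equal_split_into_days : Prop := ∀ (itinerary : List Int) (num_days : Int), Dom_split_into_days itinerary num_days → Pre_split_into_days itinerary num_days → Spec_split_into_days itinerary num_days (split_into_days itinerary num_days)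

-- ===== LEMMAS AND PROOFS =====

-- The stream of not-yet-visited first occurrences from position `index` on.
def pvDD : List Int → PySem.Set Int → List Int
  | [], _ => []
  | x :: xs, s =>
    if PySem.Set.contains s x then pvDD xs s else x :: pvDD xs (PySem.Set.add s x)

theorem pvDD_foldl_add (l : List Int) : ∀ s : PySem.Set Int,
    l.foldl PySem.Set.add s = s ++ pvDD l s := by
  induction l with
  | nil => intro s; simp [pvDD]
  | cons x xs ih =>
    intro s
    by_cases hx : PySem.Set.contains s x
    · have hmem : x ∈ s := (PySem.Set.contains_iff s x).mp hx
      simp only [List.foldl_cons, pvDD, hx, if_true]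
      rw [PySem.Set.add_of_mem hmem, ih]
    · simp only [List.foldl_cons, pvDD, hx]
      rw [ih (PySem.Set.add s x)]
      have : PySem.Set.add s x = s ++ [x] := by
        apply PySem.Set.add_of_not_mem
        intro h; exact hx ((PySem.Set.contains_iff s x).mpr h)
      rw [this]; simp

theorem pvDD_dedup (l : List Int) : pvDD l PySem.Set.empty = PySem.List.dedup l := by
  have h := pvDD_foldl_add l PySem.Set.empty
  rw [PySem.List.dedup_eq_ofList, PySem.Set.ofList_eq_foldl]
  simpa [PySem.Set.empty] using h.symm

-- Characterisation of A's inner loop: it appends the next (quota - len(day)) fresh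
-- activities of the stream to day, and the residual stream is the corresponding drop.
theorem pvInnerA_spec (it : List Int) : ∀ (n index : Nat), it.length - index = n →
    ∀ (day : List Int) (visited : PySem.Set Int) (backup : List Int) (quota : Int),
    index ≤ it.length →
    ∃ visited' backup' index',
      pvInnerA it quota day visited backup index
        = (day ++ (pvDD (it.drop index) visited).take (quota - day.length).toNat,
           visited', backup', index') ∧
      index' ≤ it.length ∧
      pvDD (it.drop index') visited'
        = (pvDD (it.drop index) visited).drop (quota - day.length).toNat := by
  intro n
  induction n with
  | zero =>
    intro index hn day visited backup quota hle
    have hix : index = it.length := by omega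
    refine ⟨visited, backup, index, ?_, hle, ?_⟩
    · rw [pvInnerA]
      have : ¬ ((day.length : Int) < quota ∧ index < it.length) := by omega
      simp [hix, pvDD]
    · simp [hix, pvDD]
  | succ n ih =>
    intro index hn day visited backup quota hle
    have hixlt : index < it.length := by omega
    by_cases hq : (day.length : Int) < quota
    · -- loop runs
      have hdrop : it.drop index = it.getD index 0 :: it.drop (index + 1) := by
        rw [List.getD_eq_getElem _ _ hixlt]
        exact List.drop_eq_getElem_cons hixlt
      set a := it.getD index 0 with ha
      rw [pvInnerA]
      simp only [hq, hixlt, and_self, dif_pos]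
      by_cases hv : PySem.Set.contains visited a = true
      · -- duplicate: goes to backup, stream unchanged
        have hskip : pvDD (it.drop index) visited = pvDD (it.drop (index + 1)) visited := by
          rw [hdrop]; simp only [pvDD]; rw [if_pos hv]
        obtain ⟨v', b', i', heq, hle', hdd⟩ :=
          ih (index + 1) (by omega) day visited (backup ++ [a]) quota (by omega)
        refine ⟨v', b', i', ?_, hle', ?_⟩
        · rw [if_pos hv, hskip]; exact heq
        · rw [hskip]; exact hdd
      · -- fresh: appended to day
        have hcons : pvDD (it.drop index) visited
            = a :: pvDD (it.drop (index + 1)) (PySem.Set.add visited a) := by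
          rw [hdrop]; simp only [pvDD]; rw [if_neg hv]
        obtain ⟨v', b', i', heq, hle', hdd⟩ :=
          ih (index + 1) (by omega) (day ++ [a]) (PySem.Set.add visited a) backup quota (by omega)
        have hsplit : (quota - (day.length : Int)).toNat
            = (quota - ((day ++ [a]).length : Int)).toNat + 1 := by
          simp only [List.length_append, List.length_cons, List.length_nil]
          omega
        refine ⟨v', b', i', ?_, hle', ?_⟩
        · rw [if_neg hv, hcons, hsplit, List.take_succ_cons, heq]
          simp [List.append_assoc]
        · rw [hcons, hsplit, List.drop_succ_cons, hdd]
    · -- quota already met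
      refine ⟨visited, backup, index, ?_, hle, ?_⟩
      · rw [pvInnerA]
        have hnot : ¬ ((day.length : Int) < quota ∧ index < it.length) := by tauto
        have h0 : (quota - (day.length : Int)).toNat = 0 := by omega
        simp [hnot, h0]
      · have h0 : (quota - (day.length : Int)).toNat = 0 := by omega
        simp [h0]

-- The synchronized outer loops.
theorem pvOuter_spec (it : List Int) (nd : Int)
    (m e : Int) (hm : 0 ≤ m) :
    ∀ (k : Nat) (d : Int), (nd - d).toNat = k → 0 ≤ d →
    ∀ (days : List (List Int)) (visited : PySem.Set Int) (backup : List Int)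
      (index : Nat) (pos : Int) (extra : Int),
    index ≤ it.length →
    0 ≤ pos →
    pvDD (it.drop index) visited = (PySem.List.dedup it).drop pos.toNat →
    extra = (if d < e then e - d else 0) →
    ((PySem.List.pyRange d nd 1).foldl (pvStepA it m) (days, visited, backup, index, extra)).1
      = ((PySem.List.pyRange d nd 1).foldl (pvStepB (PySem.List.dedup it) m e) (days, pos)).1 := by
  intro k
  induction k with
  | zero =>
    intro d hk hd days visited backup index pos extra _ _ _ _
    have : nd ≤ d := by omega
    rw [PySem.List.pyRange_one_eq_nil this]
    rfl
  | succ k ih =>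
    intro d hk hd days visited backup index pos extra hix hpos hdd hex
    have hdn : d < nd := by omega
    rw [PySem.List.pyRange_one_cons hdn]
    simp only [List.foldl_cons]
    -- the two quotas agree
    have hquota : (if extra > 0 then m + 1 else m) = m + (if d < e then 1 else 0) := by
      by_cases h : d < e
      · have hx : extra > 0 := by rw [hex, if_pos h]; omega
        simp [hx, h]
      · have hx : ¬ extra > 0 := by rw [hex, if_neg h]; omega
        simp [hx, h]
    set quota : Int := m + (if d < e then 1 else 0) with hqdef
    have hq0 : 0 ≤ quota := by rw [hqdef]; split_ifs <;> omega
    obtain ⟨v', b', i', heq, hle', hdd'⟩ :=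
      pvInnerA_spec it (it.length - index) index rfl [] visited backup
        (if extra > 0 then m + 1 else m) hix
    rw [hquota] at heq hdd'
    -- A's step
    have hstepA : pvStepA it m (days, visited, backup, index, extra) d
        = (days ++ [0 :: ((PySem.List.dedup it).drop pos.toNat).take quota.toNat],
           v', b', i', if extra > 0 then extra - 1 else extra) := by
      simp only [pvStepA]
      rw [hquota, heq]
      simp [hdd]
    -- B's step
    have hsliceq : PySem.List.slice (PySem.List.dedup it) (some pos) (some (pos + quota))
        = ((PySem.List.dedup it).drop pos.toNat).take quota.toNat := by
      rw [PySem.List.slice_toNat _ hpos (by omega)]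
      congr 1
      omega
    have hstepB : pvStepB (PySem.List.dedup it) m e (days, pos) d
        = (days ++ [0 :: ((PySem.List.dedup it).drop pos.toNat).take quota.toNat], pos + quota) := by
      simp only [pvStepB, ← hqdef, hsliceq]
    rw [hstepA, hstepB]
    apply ih (d + 1) (by omega) (by omega) _ v' b' i' (pos + quota) _ hle' (by omega)
    · rw [hdd', hdd, List.drop_drop]
      congr 1
      simp only [List.length_nil, Nat.cast_zero, sub_zero]
      omega
    · rw [hex]
      split_ifs with h1 h2 h2 <;> omega

-- [0 ≤ len // nd and 0 ≤ len % nd for nd > 0]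
theorem pv_floordiv_nonneg (a b : Int) (ha : 0 ≤ a) (hb : 0 < b) :
    0 ≤ PySem.Int.floordiv a b := by
  rw [PySem.Int.floordiv_eq_ediv_of_pos hb]
  exact Int.ediv_nonneg ha (by omega)

-- ===== VERDICT (by name: the statement is the Claim_ definition above) =====
theorem split_into_days_spec : Claim_equal_split_into_days := by
  intro it nd _ hpre
  unfold Spec_split_into_days split_into_days split_into_days_alt
  rcases lt_trichotomy nd 0 with hneg | hz | hpos
  · rw [PySem.List.pyRange_one_eq_nil (by omega)]
    rfl
  · exact absurd hz hpre
  · have hmain := pvOuter_spec it nd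
      (PySem.Int.floordiv (it.length : Int) nd) (PySem.Int.mod (it.length : Int) nd)
      (pv_floordiv_nonneg _ _ (by positivity) hpos)
      nd.toNat 0 (by omega) le_rfl
      [] PySem.Set.empty [] 0 0 (PySem.Int.mod (it.length : Int) nd)
      (by omega) le_rfl
      (by simpa [PySem.Set.empty] using pvDD_dedup it)
      (by have := PySem.Int.mod_nonneg (a := (it.length : Int)) hpos; split_ifs <;> omega)
    simp only [hmain]
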